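-- pv_equiv track=rewrite | github.com/darrenclark/advent-of-code | 2019/04/day4.py | has_exactly_two_in_a_row
-- ===== SOURCE A (Python) =====
-- def has_exactly_two_in_a_row(c):
--     p = None
--     n = 0
--
--     for v in c:
--         if v != p:
--             if n == 2: return True
--             p = v
--             n = 1
--         else:
--             n += 1
--
--     return n == 2
-- ===== SOURCE B (Python) =====
-- def has_exactly_two_in_a_row(c):
--     # Pad with None on both sides and test every length-4 window pointwise:
--     # a run of exactly two starts at b iff a != b == x != y.
--     ext = [None] + list(c) + [None, None]
--     return any(a != b and b == x and x != y
--                for a, b, x, y in zip(ext, ext[1:], ext[2:], ext[3:]))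
-- ===== Notes on version B (the rewrite author's own statement) =====
-- stated objective: alternative
-- what changed: B pads the list with None sentinels and tests each length-4 window (a,b,x,y) of four shifted zipped copies for a != b == x != y, a stateless pointwise test, instead of A's streaming previous-value/counter state machine detecting completed runs on transitions.
import Mathlib
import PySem

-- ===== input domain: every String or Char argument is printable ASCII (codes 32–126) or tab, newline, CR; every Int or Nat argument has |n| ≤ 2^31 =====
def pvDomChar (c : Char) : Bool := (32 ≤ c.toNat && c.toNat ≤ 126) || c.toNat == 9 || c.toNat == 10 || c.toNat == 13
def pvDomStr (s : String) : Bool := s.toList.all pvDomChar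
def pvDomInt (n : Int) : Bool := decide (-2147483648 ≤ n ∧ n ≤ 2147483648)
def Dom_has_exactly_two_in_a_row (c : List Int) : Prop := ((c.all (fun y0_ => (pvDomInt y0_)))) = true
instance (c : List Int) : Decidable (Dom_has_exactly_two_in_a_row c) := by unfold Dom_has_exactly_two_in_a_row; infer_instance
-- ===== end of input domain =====

-- B replaces A's previous-value/counter state machine by a stateless windowed test: pad the
-- list with None sentinels and check every length-4 window of four zipped shifted copies for
-- a != b == x != y (alternative decomposition, same O(n) cost); return values proved equal.

-- ===== PORT A =====
-- the for-loop over c with state (p, n); the early `return True` becomes the `true` branch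
def hasAgo (p : Option Int) (n : Int) : List Int → Bool
  | [] => n == 2
  | v :: rest =>
    if some v ≠ p then
      if n == 2 then true
      else hasAgo (some v) 1 rest
    else hasAgo p (n + 1) rest

def has_exactly_two_in_a_row (c : List Int) : Bool := hasAgo none 0 c

-- ===== PORT B =====
-- the generator's condition `a != b and b == x and x != y` on one window (b = some c[i]; the
-- None padding is `none`, and Option's == matches Python: None == int is False)
def q4 (t : Option Int × Option Int × Option Int × Option Int) : Bool :=
  t.1 != t.2.1 && t.2.1 == t.2.2.1 && t.2.2.1 != t.2.2.2

-- ext = [None] + list(c) + [None, None]; zip(ext, ext[1:], ext[2:], ext[3:]) (slices from a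
-- nonnegative in-range start are exactly List.drop; zip truncates to the shortest, as Python)
def has_exactly_two_in_a_row_alt (c : List Int) : Bool :=
  let ext : List (Option Int) := none :: c.map some ++ [none, none]
  (ext.zip ((ext.drop 1).zip ((ext.drop 2).zip (ext.drop 3)))).any q4

-- ===== PRECONDITION & SPEC =====
def Spec_has_exactly_two_in_a_row (c : List Int) (out : Bool) : Prop := out = has_exactly_two_in_a_row_alt c
instance (c : List Int) (out : Bool) : Decidable (Spec_has_exactly_two_in_a_row c out) := by unfold Spec_has_exactly_two_in_a_row; infer_instance

-- ===== CLAIM (what is proved, stated in full; the proofs are below) =====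
def Claim_equal_has_exactly_two_in_a_row : Prop := ∀ (c : List Int), Dom_has_exactly_two_in_a_row c → Spec_has_exactly_two_in_a_row c (has_exactly_two_in_a_row c)

-- ===== LEMMAS AND PROOFS =====

-- length of the leading run of v's (proof-only run characterisation)
def runLenN (v : Int) : List Int → Nat
  | [] => 0
  | x :: rest => if x == v then 1 + runLenN v rest else 0

-- run-based middle form: some maximal run has length exactly 2
def hasB : List Int → Bool
  | [] => false
  | v :: rest =>
    if 1 + runLenN v rest == 2 then true else hasB (rest.drop (runLenN v rest))
termination_by l => l.length
decreasing_by simp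

theorem hasB_nil : hasB [] = false := by unfold hasB; rfl

theorem hasB_cons (v : Int) (rest : List Int) :
    hasB (v :: rest) =
      (if 1 + runLenN v rest == 2 then true else hasB (rest.drop (runLenN v rest))) := by
  rw [hasB.eq_def]

-- structural form of B's zipped any: slide a 4-window down the padded list
def win4 : List (Option Int) → Bool
  | a :: b :: x :: y :: t => q4 (a, b, x, y) || win4 (b :: x :: y :: t)
  | _ => false
termination_by l => l.length
decreasing_by simp

theorem win4_cons (a b x y : Option Int) (t : List (Option Int)) :
    win4 (a :: b :: x :: y :: t) = (q4 (a, b, x, y) || win4 (b :: x :: y :: t)) := by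
  rw [win4]

theorem win4_short (l : List (Option Int)) (h : l.length < 4) : win4 l = false := by
  rw [win4.eq_def]
  match l, h with
  | [], _ => rfl
  | [_], _ => rfl
  | [_, _], _ => rfl
  | [_, _, _], _ => rfl

theorem zipAny_eq_win4 : ∀ l : List (Option Int),
    ((l.zip ((l.drop 1).zip ((l.drop 2).zip (l.drop 3)))).any q4) = win4 l
  | [] => by simp [win4_short]
  | [a] => by simp [win4_short]
  | [a, b] => by simp [win4_short]
  | [a, b, x] => by simp [win4_short]
  | a :: b :: x :: y :: t => by
    have ih := zipAny_eq_win4 (b :: x :: y :: t)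
    simp only [List.drop_succ_cons, List.drop_zero, List.zip_cons_cons, List.any_cons] at *
    rw [win4_cons, ← ih]
termination_by l => l.length
decreasing_by simp

-- B's computation as a function of a "previous element" p and the unpadded tail
def gw (p : Option Int) (c : List Int) : Bool := win4 (p :: c.map some ++ [none, none])

theorem gw_nil (p : Option Int) : gw p [] = false := by
  simp [gw, win4_short]

theorem gw_one (p : Option Int) (v : Int) : gw p [v] = false := by
  simp only [gw, List.map_cons, List.map_nil, List.cons_append, List.nil_append]
  rw [win4_cons]
  simp [q4, win4_short]

-- one step of the window slide
theorem gw_cons2 (p : Option Int) (v w : Int) (t : List Int) :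
    gw p (v :: w :: t) =
      (q4 (p, some v, some w, (t.map some).headD none) || gw (some v) (w :: t)) := by
  cases t with
  | nil =>
    simp only [gw, List.map_cons, List.map_nil, List.cons_append, List.nil_append,
      List.headD]
    rw [win4_cons]
  | cons x t' =>
    simp only [gw, List.map_cons, List.cons_append, List.headD]
    rw [win4_cons]

theorem gw_skip (v : Int) (rest : List Int) : gw (some v) (v :: rest) = gw (some v) rest := by
  cases rest with
  | nil => rw [gw_one, gw_nil]
  | cons w t => rw [gw_cons2]; simp [q4]

theorem gw_skipRun : ∀ (l : List Int) (v : Int),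
    gw (some v) l = gw (some v) (l.drop (runLenN v l))
  | [], v => by simp [runLenN]
  | x :: t, v => by
    by_cases h : x = v
    · subst h
      have : runLenN x (x :: t) = 1 + runLenN x t := by simp [runLenN]
      rw [this, gw_skip, show (1 + runLenN x t) = runLenN x t + 1 from by omega,
        List.drop_succ_cons]
      exact gw_skipRun t x
    · simp [runLenN, h]

theorem runLen_drop_head (v : Int) : ∀ l : List Int,
    (l.drop (runLenN v l)).head? ≠ some v
  | [] => by simp [runLenN]
  | x :: t => by
    by_cases h : x = v
    · subst h
      have : runLenN x (x :: t) = 1 + runLenN x t := by simp [runLenN]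
      rw [this, show (1 + runLenN x t) = runLenN x t + 1 from by omega, List.drop_succ_cons]
      exact runLen_drop_head x t
    · simp [runLenN, h]

theorem gw_eq_hasB : ∀ (n : Nat) (c : List Int), c.length ≤ n →
    ∀ p : Option Int, (∀ v, c.head? = some v → p ≠ some v) → gw p c = hasB c := by
  intro n
  induction n with
  | zero =>
    intro c hc p _
    have : c = [] := List.eq_nil_of_length_eq_zero (Nat.le_zero.mp hc)
    subst this; simp [gw_nil, hasB_nil]
  | succ n ih =>
    intro c hc p hp
    cases c with
    | nil => simp [gw_nil, hasB_nil]
    | cons v rest =>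
      have hpv : p ≠ some v := hp v rfl
      have hpb : (p != some v) = true := by simp [bne_iff_ne, hpv]
      cases rest with
      | nil =>
        -- [v]: a single run of length 1
        rw [gw_one, hasB_cons]
        simp [runLenN, hasB_nil]
      | cons w rest' =>
        by_cases hw : w = v
        · subst hw
          cases rest' with
          | nil =>
            -- [w, w]: a run of exactly two — the window fires
            rw [gw_cons2, hasB_cons]
            simp [q4, hpb, runLenN]
          | cons u rest'' =>
            by_cases hu : u = w
            · -- run of length ≥ 3: the window fails on x != y; skip the rest of the run
              subst hu
              have h1 : gw p (u :: u :: u :: rest'') = gw (some u) (u :: u :: rest'') := by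
                rw [gw_cons2]; simp [q4]
              have h2 := gw_skipRun (u :: u :: rest'') u
              have hrl : runLenN u (u :: u :: rest'') = 1 + (1 + runLenN u rest'') := by
                simp [runLenN]
              rw [hrl] at h2
              have hdrop : (u :: u :: rest'').drop (1 + (1 + runLenN u rest'')) =
                  rest''.drop (runLenN u rest'') := by
                rw [show (1 + (1 + runLenN u rest'')) = runLenN u rest'' + 1 + 1 from by omega]
                simp [List.drop_succ_cons]
              rw [hdrop] at h2
              have hlen : (rest''.drop (runLenN u rest'')).length ≤ n := by
                have hld := List.length_drop (l := rest'') (i := runLenN u rest'')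
                have hc' : rest''.length + 3 ≤ n + 1 := by
                  simpa [List.length_cons] using hc
                omega
              have hhead : ∀ x, (rest''.drop (runLenN u rest'')).head? = some x →
                  (some u : Option Int) ≠ some x := by
                intro x hx h
                apply runLen_drop_head u rest''
                rw [hx]
                exact congrArg some (Option.some.inj h).symm
              have h3 := ih (rest''.drop (runLenN u rest'')) hlen (some u) hhead
              rw [h1, h2, h3, hasB_cons, hrl]
              have hne : (1 + (1 + (1 + runLenN u rest'')) == 2) = false := by
                simp; omega
              rw [hne]
              simp only [Bool.false_eq_true, if_false, hdrop]
            · -- run of exactly two followed by a different element: the window fires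
              have hq : q4 (p, some w, some w, ((u :: rest'').map some).headD none) = true := by
                simp [q4, hpb, bne_iff_ne]
                exact fun h => hu h.symm
              rw [gw_cons2, hq, hasB_cons]
              have : runLenN w (w :: u :: rest'') = 1 + runLenN w (u :: rest'') := by
                simp [runLenN]
              rw [this, show runLenN w (u :: rest'') = 0 from by simp [runLenN, hu]]
              simp
        · -- new value w ≠ v: the window fails on b == x; shift the previous element
          have hmid : ((some v : Option Int) == some w) = false := by
            simp [beq_eq_false_iff_ne]
            exact fun h => hw h.symm
          have h1 : gw p (v :: w :: rest') = gw (some v) (w :: rest') := by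
            rw [gw_cons2]; simp [q4, hmid]
          have hlen : (w :: rest').length ≤ n := by
            simp [List.length_cons] at hc ⊢; omega
          have h2 := ih (w :: rest') hlen (some v) (by
            intro x hx h
            apply hw
            simp at hx
            exact hx.trans (Option.some.inj h).symm)
          rw [h1, h2, hasB_cons v (w :: rest'),
            show runLenN v (w :: rest') = 0 from by simp [runLenN, hw]]
          simp

-- A's loop, on a run: count the rest of the current run, then continue run-wise
theorem hasAgo_run (rest : List Int) (v : Int) (n : Int) :
    hasAgo (some v) n rest =
      (decide (n + (runLenN v rest : Int) = 2) || hasB (rest.drop (runLenN v rest))) := by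
  induction rest generalizing v n with
  | nil => simp [hasAgo, runLenN, hasB_nil, beq_eq_decide]
  | cons x rest' ih =>
    by_cases he : x = v
    · have hstep : hasAgo (some v) n (x :: rest') = hasAgo (some v) (n + 1) rest' := by
        simp [hasAgo, he]
      have hrl : runLenN v (x :: rest') = runLenN v rest' + 1 := by
        simp [runLenN, he]; omega
      have h2 : (n + ((runLenN v rest' + 1 : Nat) : Int) = 2) ↔ (n + 1 + (runLenN v rest' : Int) = 2) := by
        push_cast; omega
      rw [hstep, ih, hrl, List.drop_succ_cons, decide_eq_decide.mpr h2]
    · have hstep : hasAgo (some v) n (x :: rest') =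
          (if n == 2 then true else hasAgo (some x) 1 rest') := by
        simp [hasAgo, he]
      have h0 : runLenN v (x :: rest') = 0 := by simp [runLenN, he]
      rw [hstep, ih, h0, List.drop_zero, hasB_cons]
      by_cases hn : n = 2 <;> by_cases hk : 1 + runLenN x rest' = 2 <;>
        simp [hn, hk, show ((1 : Int) + (runLenN x rest' : Int) = 2) ↔ (1 + runLenN x rest' = 2) from by omega]

-- ===== VERDICT (by name: the statement is the Claim_ definition above) =====
theorem has_exactly_two_in_a_row_spec : Claim_equal_has_exactly_two_in_a_row := by
  intro c _
  show has_exactly_two_in_a_row c = has_exactly_two_in_a_row_alt c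
  have halt : has_exactly_two_in_a_row_alt c = gw none c := by
    rw [has_exactly_two_in_a_row_alt, gw, zipAny_eq_win4]
  have hgw : gw none c = hasB c := by
    apply gw_eq_hasB c.length c le_rfl
    intro v _
    simp
  rw [halt, hgw]
  cases c with
  | nil => simp [has_exactly_two_in_a_row, hasAgo, hasB_nil]
  | cons v rest =>
    have hA : has_exactly_two_in_a_row (v :: rest) = hasAgo (some v) 1 rest := by
      simp [has_exactly_two_in_a_row, hasAgo]
    rw [hA, hasAgo_run, hasB_cons]
    by_cases hk : 1 + runLenN v rest = 2 <;>
      simp [hk, show ((1 : Int) + (runLenN v rest : Int) = 2) ↔ (1 + runLenN v rest = 2) from by omega]
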